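-- pv_equiv track=rewrite | github.com/Petra313/bioinf | Ch1/ba1f.py | skewMin
-- ===== SOURCE A (Python) =====
-- def skewMin(genome):
--     count=[]
--     c=0
--     for i in genome:
--         if i=='C':
--             c=c-1
--         elif i=='G':
--             c=c+1
--         count.append(c)
--     return count
-- ===== SOURCE B (Python) =====
-- def skewMin(genome):
--     # Divide and conquer: skew of the whole string is the skew of the left half
--     # followed by the skew of the right half shifted by the left half's final value.
--     n = len(genome)
--     if n == 0:
--         return []
--     if n == 1:
--         return [1] if genome == 'G' else ([-1] if genome == 'C' else [0])
--     mid = n // 2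
--     left = skewMin(genome[:mid])
--     right = skewMin(genome[mid:])
--     off = left[-1]
--     return left + [off + v for v in right]
-- ===== Notes on version B (the rewrite author's own statement) =====
-- stated objective: alternative
-- what changed: Replaces the single fused running-counter loop with a divide-and-conquer recursion: compute the skew of each half independently and shift the right half's values by the left half's final skew.
import Mathlib
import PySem

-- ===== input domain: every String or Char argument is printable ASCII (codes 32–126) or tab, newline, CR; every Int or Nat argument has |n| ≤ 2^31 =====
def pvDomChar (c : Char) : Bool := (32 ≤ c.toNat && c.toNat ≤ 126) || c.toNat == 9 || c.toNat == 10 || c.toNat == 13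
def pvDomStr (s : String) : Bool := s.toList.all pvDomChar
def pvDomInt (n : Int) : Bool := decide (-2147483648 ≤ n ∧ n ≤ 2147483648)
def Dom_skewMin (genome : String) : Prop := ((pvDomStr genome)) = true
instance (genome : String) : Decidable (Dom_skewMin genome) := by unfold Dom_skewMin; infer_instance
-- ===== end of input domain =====

-- B computes the same running GC-skew by divide and conquer (halves, then shift the right half); alternative decomposition, not faster.

-- ===== PORT A =====
-- A: one fused loop carrying the list built so far and the running counter c, appending c after each character.
def skewMin (genome : String) : List Int :=
  (genome.toList.foldl
    (fun (st : List Int × Int) i =>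
      let c := if i = 'C' then st.2 - 1 else if i = 'G' then st.2 + 1 else st.2
      (st.1 ++ [c], c))
    ([], 0)).1

-- ===== PORT B =====
-- B: divide and conquer over the character list (genome[:mid] / genome[mid:] become take/drop,
-- exact for 0 ≤ mid ≤ n).  left[-1] is total on the nonempty left half; getLastD 0 is exact there.
def pvDnc (l : List Char) : List Int :=
  if l.length ≤ 1 then
    match l with
    | [] => []
    | ch :: _ => [if ch = 'G' then (1 : Int) else if ch = 'C' then -1 else 0]
  else
    let mid := l.length / 2
    let left := pvDnc (l.take mid)
    let right := pvDnc (l.drop mid)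
    let off := left.getLastD 0
    left ++ right.map (fun v => off + v)
termination_by l.length
decreasing_by
  · simp only [List.length_take]; omega
  · simp only [List.length_drop]; omega

def skewMin_alt (genome : String) : List Int := pvDnc genome.toList

-- ===== PRECONDITION & SPEC =====
def Spec_skewMin (genome : String) (out : List Int) : Prop := out = skewMin_alt genome
instance (genome : String) (out : List Int) : Decidable (Spec_skewMin genome out) := by unfold Spec_skewMin; infer_instance

-- ===== CLAIM (what is proved, stated in full; the proofs are below) =====
def Claim_equal_skewMin : Prop := ∀ (genome : String), Dom_skewMin genome → Spec_skewMin genome (skewMin genome)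

-- ===== LEMMAS AND PROOFS =====
-- canonical prefix-sum characterisation, used to relate both ports
def pvDelta (ch : Char) : Int := if ch = 'G' then 1 else if ch = 'C' then -1 else 0

def pvAcc (c : Int) : List Char → List Int
  | [] => []
  | h :: t => (c + pvDelta h) :: pvAcc (c + pvDelta h) t

theorem pvAcc_shift (a c : Int) (l : List Char) :
    pvAcc (a + c) l = (pvAcc c l).map (fun v => a + v) := by
  induction l generalizing c with
  | nil => simp [pvAcc]
  | cons h t ih => simp [pvAcc, add_assoc, ih]

theorem pvAcc_append (c : Int) (l1 l2 : List Char) :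
    pvAcc c (l1 ++ l2) = pvAcc c l1 ++ pvAcc (c + (l1.map pvDelta).sum) l2 := by
  induction l1 generalizing c with
  | nil => simp [pvAcc]
  | cons h t ih => simp [pvAcc, ih, add_assoc]

theorem pvAcc_last (c : Int) (l : List Char) (hl : l ≠ []) :
    (pvAcc c l).getLastD 0 = c + (l.map pvDelta).sum := by
  induction l generalizing c with
  | nil => exact absurd rfl hl
  | cons h t ih =>
    cases t with
    | nil => simp [pvAcc]
    | cons h2 t2 =>
      have := ih (c := c + pvDelta h) (by simp)
      simp only [pvAcc, List.getLastD_cons] at this ⊢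
      rw [this]
      simp [add_assoc]

theorem pvDnc_eq : ∀ (n : ℕ) (l : List Char), l.length = n → pvDnc l = pvAcc 0 l := by
  intro n
  induction n using Nat.strong_induction_on with
  | _ n ih =>
    intro l hn
    rw [pvDnc.eq_def]
    by_cases h1 : l.length ≤ 1
    · simp only [h1, if_true]
      match l with
      | [] => simp [pvAcc]
      | [ch] => simp [pvAcc, pvDelta]
      | a :: b :: t => simp at h1
    · simp only [h1, if_false]
      have hlen : l.length = n := hn
      have hmidlt : l.length / 2 < n := by omega
      have hdroplt : l.length - l.length / 2 < n := by omega
      have htake := ih (l.length / 2) hmidlt (l.take (l.length / 2))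
        (by simp only [List.length_take]; omega)
      have hdrop := ih (l.length - l.length / 2) hdroplt (l.drop (l.length / 2))
        (by simp only [List.length_drop])
      simp only [htake, hdrop]
      have htne : l.take (l.length / 2) ≠ [] := by
        intro h; have := congrArg List.length h
        simp only [List.length_take, List.length_nil] at this; omega
      rw [pvAcc_last 0 _ htne]
      have hshift := pvAcc_shift (0 + ((l.take (l.length / 2)).map pvDelta).sum) 0 (l.drop (l.length / 2))
      rw [add_zero] at hshift
      rw [← hshift]
      have := pvAcc_append 0 (l.take (l.length / 2)) (l.drop (l.length / 2))
      rw [List.take_append_drop] at this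
      rw [this]

theorem skewMin_foldl_eq (l : List Char) (pre : List Int) (c : Int) :
    (l.foldl
      (fun (st : List Int × Int) i =>
        let c := if i = 'C' then st.2 - 1 else if i = 'G' then st.2 + 1 else st.2
        (st.1 ++ [c], c))
      (pre, c)).1
    = pre ++ pvAcc c l := by
  induction l generalizing pre c with
  | nil => simp [pvAcc]
  | cons i t ih =>
    simp only [List.foldl_cons]
    by_cases hC : i = 'C'
    · subst hC; rw [ih]; simp [pvAcc, pvDelta, sub_eq_add_neg]
    · by_cases hG : i = 'G'
      · subst hG; simp only [hC, if_false]; rw [ih]; simp [pvAcc, pvDelta]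
      · simp only [hC, hG, if_false]; rw [ih]; simp [pvAcc, pvDelta, hC, hG]

-- ===== VERDICT (by name: the statement is the Claim_ definition above) =====
theorem skewMin_spec : Claim_equal_skewMin := by
  intro genome _
  unfold Spec_skewMin skewMin skewMin_alt
  rw [pvDnc_eq genome.toList.length genome.toList rfl]
  simpa using skewMin_foldl_eq genome.toList [] 0
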